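-- pv_equiv track=rewrite | github.com/MinstrelsyXia/GRUtopia_VLN | vln/src/local_nav/camera_occupancy_map.py | find_non_zero_range
-- ===== SOURCE A (Python) =====
-- def find_non_zero_range(array):
--     length = len(array)
--     l = 0
--     r = length - 1
--     while l < length:
--         if array[l] != 0:
--             break
--         l += 1
--     while r >= 0:
--         if array[r] != 0:
--             break
--         r -= 1
--
--     return l, r
-- ===== SOURCE B (Python) =====
-- def find_non_zero_range(array):
--     idx = [i for i, x in enumerate(array) if x != 0]
--     if idx:
--         return idx[0], idx[-1]
--     return len(array), -1
-- ===== Notes on version B (the rewrite author's own statement) =====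
-- stated objective: simpler
-- what changed: Replaces A's two early-stopping boundary scans (one forward with an index counter, one backward) by a single forward pass collecting all non-zero indices and returning its first and last element, with (len,-1) for the all-zero case.
import Mathlib
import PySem

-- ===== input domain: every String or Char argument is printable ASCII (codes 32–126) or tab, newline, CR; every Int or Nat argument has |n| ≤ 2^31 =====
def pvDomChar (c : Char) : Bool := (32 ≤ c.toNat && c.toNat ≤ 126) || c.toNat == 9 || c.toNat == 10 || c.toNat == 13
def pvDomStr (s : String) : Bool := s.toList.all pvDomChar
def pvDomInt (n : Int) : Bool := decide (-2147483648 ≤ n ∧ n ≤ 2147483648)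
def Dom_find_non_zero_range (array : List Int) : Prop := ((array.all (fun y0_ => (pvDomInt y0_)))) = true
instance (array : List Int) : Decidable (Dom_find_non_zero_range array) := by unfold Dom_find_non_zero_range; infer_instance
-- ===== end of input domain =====

-- B replaces A's two early-stopping boundary scans by one index-collecting pass; simpler, same O(n) cost.

-- ===== PORT A =====
-- first while loop: advance l while array[l] == 0
def pvScanL (array : List Int) (l : Nat) : Nat :=
  if h : l < array.length then
    if array[l] ≠ 0 then l else pvScanL array (l + 1)
  else l
termination_by array.length - l

-- second while loop: decrease r while array[r] == 0
def pvScanR (array : List Int) (r : Int) : Int :=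
  if 0 ≤ r then
    if array.getD r.toNat 0 ≠ 0 then r else pvScanR array (r - 1)
  else r
termination_by (r + 1).toNat
decreasing_by omega

def find_non_zero_range (array : List Int) : Int × Int :=
  ((pvScanL array 0 : Int), pvScanR array ((array.length : Int) - 1))

-- ===== PORT B =====
def find_non_zero_range_alt (array : List Int) : Int × Int :=
  let idx := ((PySem.List.enumerate array).filter (fun p => p.2 != 0)).map (fun p => p.1)
  if h : idx ≠ [] then (idx.head h, idx.getLast h) else ((array.length : Int), -1)

-- ===== PRECONDITION & SPEC =====
def Spec_find_non_zero_range (array : List Int) (out : Int × Int) : Prop := out = find_non_zero_range_alt array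
instance (array : List Int) (out : Int × Int) : Decidable (Spec_find_non_zero_range array out) := by unfold Spec_find_non_zero_range; infer_instance

-- ===== CLAIM (what is proved, stated in full; the proofs are below) =====
def Claim_equal_find_non_zero_range : Prop := ∀ (array : List Int), Dom_find_non_zero_range array → Spec_find_non_zero_range array (find_non_zero_range array)

-- ===== LEMMAS AND PROOFS =====

-- index of the first non-zero element, if any
def pvFirst? : List Int → Option Nat
  | [] => none
  | x :: t => if x ≠ 0 then some 0 else (pvFirst? t).map (· + 1)

-- index of the last non-zero element, if any
def pvLast? : List Int → Option Nat
  | [] => none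
  | x :: t =>
    match pvLast? t with
    | some j => some (j + 1)
    | none => if x ≠ 0 then some 0 else none

theorem pvFirst?_none_iff_pvLast?_none (xs : List Int) : pvFirst? xs = none ↔ pvLast? xs = none := by
  induction xs with
  | nil => simp [pvFirst?, pvLast?]
  | cons x t ih =>
    simp only [pvFirst?, pvLast?]
    by_cases hx : x = 0 <;> cases ht : pvLast? t <;>
      simp_all [Option.map_eq_none_iff]

theorem pvLast?_append_singleton (ys : List Int) (x : Int) :
    pvLast? (ys ++ [x]) = if x ≠ 0 then some ys.length else pvLast? ys := by
  induction ys with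
  | nil => by_cases hx : x = 0 <;> simp [pvLast?, hx]
  | cons y t ih =>
    simp only [List.cons_append, pvLast?, ih]
    by_cases hx : x = 0
    · simp [hx]
    · simp [hx]

theorem pvScanL_spec (xs : List Int) : ∀ (n l : Nat), xs.length - l = n → l ≤ xs.length →
    pvScanL xs l = l + ((pvFirst? (xs.drop l)).getD (xs.drop l).length) := by
  intro n
  induction n with
  | zero =>
    intro l hn hl
    have hlen : l = xs.length := by omega
    rw [pvScanL]
    simp [hlen, pvFirst?]
  | succ n ih =>
    intro l hn hl
    have hlt : l < xs.length := by omega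
    have hdrop : xs.drop l = xs[l] :: xs.drop (l + 1) := List.drop_eq_getElem_cons hlt
    rw [pvScanL, dif_pos hlt, hdrop]
    simp only [pvFirst?]
    by_cases hx : xs[l] = 0
    · rw [if_neg (by simp [hx]), if_neg (by simp [hx])]
      rw [ih (l + 1) (by omega) (by omega)]
      have h1 : (xs.drop (l + 1)).length = xs.length - (l + 1) := by simp
      cases hf : pvFirst? (xs.drop (l + 1)) with
      | none => simp only [Option.map_none, Option.getD_none, List.length_cons]; omega
      | some j => simp only [Option.map_some, Option.getD_some]; omega
    · rw [if_pos (by simp [hx]), if_pos (by simp [hx])]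
      simp

theorem pvScanR_spec (xs : List Int) : ∀ (n : Nat) (r : Int), (r + 1).toNat = n → -1 ≤ r →
    r < (xs.length : Int) →
    pvScanR xs r = ((pvLast? (xs.take (r + 1).toNat)).map (fun j => (j : Int))).getD (-1) := by
  intro n
  induction n with
  | zero =>
    intro r hn hr1 hr2
    have : r = -1 := by omega
    subst this
    rw [pvScanR]
    simp [pvLast?]
  | succ n ih =>
    intro r hn hr1 hr2
    have hr0 : 0 ≤ r := by omega
    have hlt : r.toNat < xs.length := by omega
    have htake : xs.take (r + 1).toNat = xs.take r.toNat ++ [xs[r.toNat]] := by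
      have h2 : (r + 1).toNat = r.toNat + 1 := by omega
      rw [h2, List.take_add_one, List.getElem?_eq_getElem hlt]
      rfl
    have hget : xs.getD r.toNat 0 = xs[r.toNat] := List.getD_eq_getElem xs 0 hlt
    rw [pvScanR, if_pos hr0, hget, htake, pvLast?_append_singleton]
    have hlentake : (xs.take r.toNat).length = r.toNat := by simp; omega
    by_cases hx : xs[r.toNat] = 0
    · rw [if_neg (by simp [hx]), if_neg (by simp [hx])]
      rw [ih (r - 1) (by omega) (by omega) (by omega)]
      have h3 : (r - 1 + 1).toNat = r.toNat := by omega
      rw [h3]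
    · rw [if_pos (by simp [hx]), if_pos (by simp [hx])]
      simp [hlentake]
      omega

theorem pv_head?_filtered (xs : List Int) : ∀ (k : Int),
    (((PySem.List.enumerate xs k).filter (fun p => p.2 != 0)).map (fun p => p.1)).head? =
      (pvFirst? xs).map (fun j => k + (j : Int)) := by
  induction xs with
  | nil => intro k; simp [PySem.List.enumerate_nil, pvFirst?]
  | cons x t ih =>
    intro k
    rw [PySem.List.enumerate_cons, List.filter_cons]
    by_cases hx : x = 0
    · rw [if_neg (by simp [hx])]
      rw [ih (k + 1)]
      cases hft : pvFirst? t
      · simp [pvFirst?, hx, hft]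
      · simp [pvFirst?, hx, hft]; ring
    · rw [if_pos (by simp [hx])]
      simp [pvFirst?, hx]

theorem pv_getLast?_filtered (xs : List Int) : ∀ (k : Int),
    (((PySem.List.enumerate xs k).filter (fun p => p.2 != 0)).map (fun p => p.1)).getLast? =
      (pvLast? xs).map (fun j => k + (j : Int)) := by
  induction xs with
  | nil => intro k; simp [PySem.List.enumerate_nil, pvLast?]
  | cons x t ih =>
    intro k
    rw [PySem.List.enumerate_cons, List.filter_cons]
    have htail := ih (k + 1)
    cases ht : pvLast? t with
    | some j =>
      rw [ht] at htail
      by_cases hx : x = 0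
      · rw [if_neg (by simp [hx])]
        rw [htail]
        simp only [pvLast?, ht]
        simp
        ring
      · rw [if_pos (by simp [hx])]
        rw [List.map_cons, List.getLast?_cons, htail]
        simp only [pvLast?, ht]
        simp
        ring
    | none =>
      rw [ht] at htail
      have hnil : (((PySem.List.enumerate t (k + 1)).filter (fun p => p.2 != 0)).map (fun p => p.1)) = [] :=
        List.getLast?_eq_none_iff.mp (by simpa using htail)
      by_cases hx : x = 0
      · rw [if_neg (by simp [hx])]
        rw [hnil]
        simp [pvLast?, ht, hx]
      · rw [if_pos (by simp [hx])]
        rw [List.map_cons, hnil]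
        simp [pvLast?, ht, hx]

-- ===== VERDICT (by name: the statement is the Claim_ definition above) =====
theorem find_non_zero_range_spec : Claim_equal_find_non_zero_range := by
  intro array _
  unfold Spec_find_non_zero_range find_non_zero_range find_non_zero_range_alt
  have hL : pvScanL array 0 = (pvFirst? array).getD array.length := by
    have := pvScanL_spec array array.length 0 (by omega) (by omega)
    simpa using this
  have hR : pvScanR array ((array.length : Int) - 1) =
      ((pvLast? array).map (fun j => (j : Int))).getD (-1) := by
    have h := pvScanR_spec array array.length ((array.length : Int) - 1) (by omega) (by omega) (by omega)
    rw [h]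
    have h2 : (((array.length : Int) - 1) + 1).toNat = array.length := by omega
    rw [h2, List.take_length]
  have hhead := pv_head?_filtered array 0
  have hlast := pv_getLast?_filtered array 0
  simp only [zero_add] at hhead hlast
  rw [hL, hR]
  cases hf : pvFirst? array with
  | none =>
    have hl : pvLast? array = none := (pvFirst?_none_iff_pvLast?_none array).mp hf
    rw [hf] at hhead
    have hnil : (((PySem.List.enumerate array 0).filter (fun p => p.2 != 0)).map (fun p => p.1)) = [] :=
      List.head?_eq_none_iff.mp (by simpa using hhead)
    rw [dif_neg (by simp [hnil])]
    simp [hl]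
  | some j =>
    obtain ⟨j', hl⟩ : ∃ j', pvLast? array = some j' := by
      cases hl0 : pvLast? array with
      | none => exact absurd ((pvFirst?_none_iff_pvLast?_none array).mpr hl0) (by simp [hf])
      | some j' => exact ⟨j', rfl⟩
    rw [hf] at hhead; rw [hl] at hlast
    have hne : (((PySem.List.enumerate array 0).filter (fun p => p.2 != 0)).map (fun p => p.1)) ≠ [] := by
      intro hc; rw [hc] at hhead; simp at hhead
    rw [dif_pos hne]
    have hh : (((PySem.List.enumerate array 0).filter (fun p => p.2 != 0)).map (fun p => p.1)).head hne = (j : Int) := by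
      have := List.head?_eq_some_head hne
      rw [this] at hhead
      simpa using hhead
    have hg : (((PySem.List.enumerate array 0).filter (fun p => p.2 != 0)).map (fun p => p.1)).getLast hne = (j' : Int) := by
      have := List.getLast?_eq_some_getLast hne
      rw [this] at hlast
      simpa using hlast
    rw [hh, hg]
    simp [hl]
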